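-- pv_equiv track=rewrite | github.com/banbiossa/algomethod | src/ninety/done/p51_5_typical_shop.py | describe_all
-- ===== SOURCE A (Python) =====
-- from collections import defaultdict
--
-- def describe_all(A, K):
--     # 全列挙する
--     N = len(A)
--     d = defaultdict(list)
--     # binary 全探索
--     for i in range(2 ** N):
--         key = bin(i).count("1")
--         if key > K:
--             continue
--         value = sum([A[j] for j in range(N) if i & (1 << j)])
--         d[key].append(value)
--
--     for v in d.values():
--         v.sort()
--
--     return d
-- ===== SOURCE B (Python) =====
-- from collections import defaultdict
--
-- def describe_all(A, K):
--     # Layered subset-sum DP: layers[k] holds the sums of the k-element subsets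
--     # of the prefix read so far; only counts up to min(len(A), K) are ever
--     # materialised.  Result is returned as a defaultdict(list), like A's.
--     N = len(A)
--     limit = min(N, K)
--     d = defaultdict(list)
--     if limit < 0:
--         return d
--     layers = [[0]] + [[] for _ in range(limit)]
--     for a in A:
--         layers = layers[:1] + [cur + [s + a for s in prev]
--                                for cur, prev in zip(layers[1:], layers)]
--     for k, v in enumerate(layers):
--         d[k] = sorted(v)
--     return d
-- ===== Notes on version B (the rewrite author's own statement) =====
-- stated objective: alternative
-- what changed: A enumerates all 2^N bitmasks and groups each mask's popcount-keyed sum into a defaultdict; B runs a layered subset-sum DP that builds, element by element, only the sum lists for subset sizes up to min(len(A), K), never visiting larger subsets.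
import Mathlib
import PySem

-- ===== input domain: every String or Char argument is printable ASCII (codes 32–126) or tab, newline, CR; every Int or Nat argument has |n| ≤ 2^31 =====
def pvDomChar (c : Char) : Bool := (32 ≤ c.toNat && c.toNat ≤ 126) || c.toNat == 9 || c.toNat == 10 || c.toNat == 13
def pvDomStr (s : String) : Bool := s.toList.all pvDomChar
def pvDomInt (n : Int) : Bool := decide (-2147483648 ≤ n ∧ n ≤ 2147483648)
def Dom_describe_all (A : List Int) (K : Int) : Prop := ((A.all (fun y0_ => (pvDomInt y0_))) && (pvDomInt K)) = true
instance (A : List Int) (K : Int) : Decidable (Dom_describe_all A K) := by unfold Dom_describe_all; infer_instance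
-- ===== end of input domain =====

-- B replaces A's bitmask enumeration of all 2^N subsets by a layered subset-sum DP that only
-- materialises subsets of at most min(len(A), K) elements (objective: alternative; intended as
-- faster for small K and a timing run measured B faster at n=16, but both are exponential
-- when K >= N and time out at n=64, so no overall speed claim is made).

-- ===== PORT A =====
-- literal port of A: for each mask i in range(2**N), key = popcount(i) (bin(i).count("1") is
-- i.bit_count(), i.e. PySem.Int.bitCount), skip the mask if key > K, else append the masked sum
-- to d[key] (defaultdict(list) append = Dict.modify key [] (· ++ [value])); finally every value
-- list is sorted in place and d is returned (as its items).  In the comprehension 0 ≤ j < len(A),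
-- so A[j] never raises and pyGetD is exact there.
def describe_all (A : List Int) (K : Int) : List (Int × List Int) :=
  let N := A.length
  let d : PySem.Dict Int (List Int) :=
    (PySem.List.pyRange 0 ((2:Int)^N) 1).foldl (fun d i =>
      let key : Int := (PySem.Int.bitCount i : Int)
      if key > K then d
      else
        let value : Int :=
          (((PySem.List.pyRange 0 (N : Int) 1).filter
              (fun j => PySem.Int.band i ((1:Int) <<< (j.toNat : Int)) != 0)).map
            (fun j => PySem.List.pyGetD A j 0)).sum
        d.modify key [] (fun v => v ++ [value]))
      PySem.Dict.empty
  d.items.map (fun p => (p.1, PySem.List.sorted p.2 (fun x => x) false))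

-- ===== PORT B =====
-- literal port of Source B: layers[k] = sums of the k-element subsets of the prefix read so far,
-- rebuilt functionally for each element a as layers[:1] + [cur + [s+a for s in prev] ...];
-- the returned defaultdict d maps k to sorted(layers[k]) for k = 0..limit (empty when
-- limit < 0), i.e. as an association list: enumerate(layers) with each value sorted.
def describe_all_alt (A : List Int) (K : Int) : List (Int × List Int) :=
  let N : Int := (A.length : Int)
  let limit := min N K
  if limit < 0 then []
  else
    let layers0 : List (List Int) := [[0]] ++ List.replicate limit.toNat []
    let layers := A.foldl (fun layers a =>
      PySem.List.slice layers none (some 1) ++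
        ((PySem.List.slice layers (some 1) none).zip layers).map
          (fun p => p.1 ++ p.2.map (fun s => s + a))) layers0
    (PySem.List.enumerate layers 0).map (fun p => (p.1, PySem.List.sorted p.2 (fun x => x) false))

-- ===== PRECONDITION & SPEC =====
def Spec_describe_all (A : List Int) (K : Int) (out : List (Int × List Int)) : Prop := out = describe_all_alt A K
instance (A : List Int) (K : Int) (out : List (Int × List Int)) : Decidable (Spec_describe_all A K out) := by unfold Spec_describe_all; infer_instance

-- ===== CLAIM (what is proved, stated in full; the proofs are below) =====
def Claim_equal_describe_all : Prop := ∀ (A : List Int) (K : Int), Dom_describe_all A K → Spec_describe_all A K (describe_all A K)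

-- ===== LEMMAS AND PROOFS =====

-- popcount of a natural number, as A's port computes it
def pcN (i : Nat) : Nat := PySem.Int.bitCount (i : Int)

-- sum of the elements of A selected by the bits of mask i
def msum (A : List Int) (i : Nat) : Int :=
  (((List.range A.length).filter (fun j => i.testBit j)).map (fun j => A.getD j 0)).sum

-- the sums of all k-element subsets of A, in increasing mask order
def grp (A : List Int) (k : Nat) : List Int :=
  ((List.range (2 ^ A.length)).filter (fun i => decide (pcN i = k))).map (msum A)

-- the common closed form both ports are reduced to
def closedForm (A : List Int) (K : Int) : List (Int × List Int) :=
  if K < 0 then []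
  else (List.range (min A.length K.toNat + 1)).map
    (fun k : Nat => ((k : Int), PySem.List.sorted (grp A k) (fun x => x) false))

lemma pcN_zero : pcN 0 = 0 := PySem.Int.bitCount_zero

lemma pcN_halve (m : Nat) : pcN m = m % 2 + pcN (m / 2) := by
  rcases Nat.eq_zero_or_pos m with h | h
  · subst h; simp [pcN_zero]
  · exact PySem.Int.bitCount_natCast h

lemma pcN_two_pow_add (N : Nat) : ∀ i, i < 2^N → pcN (2^N + i) = pcN i + 1 := by
  induction N with
  | zero =>
    intro i hi
    interval_cases i
    simp [pcN_halve 1, pcN_zero]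
  | succ N ih =>
    intro i hi
    have h2 : 2^(N+1) = 2 * 2^N := by ring
    have hmod : (2^(N+1) + i) % 2 = i % 2 := by omega
    have hdiv : (2^(N+1) + i) / 2 = 2^N + i / 2 := by omega
    have hlt : i / 2 < 2^N := by omega
    rw [pcN_halve (2^(N+1) + i), hmod, hdiv, ih _ hlt, pcN_halve i]
    omega

lemma msum_low (A : List Int) (a : Int) (i : Nat) (h : i < 2^A.length) :
    msum (A ++ [a]) i = msum A i := by
  unfold msum
  rw [List.length_append, List.length_cons, List.length_nil, List.range_succ,
    List.filter_append]
  have hN : i.testBit A.length = false := Nat.testBit_lt_two_pow h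
  have hone : [A.length].filter (fun j => i.testBit j) = [] := by simp [hN]
  rw [hone, List.append_nil]
  apply congrArg
  apply List.map_congr_left
  intro j hj
  have hj' : j < A.length := List.mem_range.mp (List.mem_of_mem_filter hj)
  exact List.getD_append A [a] 0 j hj'

lemma msum_high (A : List Int) (a : Int) (i : Nat) (h : i < 2^A.length) :
    msum (A ++ [a]) (2^A.length + i) = msum A i + a := by
  unfold msum
  rw [List.length_append, List.length_cons, List.length_nil, List.range_succ,
    List.filter_append]
  have hN : (2^A.length + i).testBit A.length = true := by
    have := Nat.testBit_two_pow_add_eq i A.length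
    simp [this, Nat.testBit_lt_two_pow h]
  have hone : [A.length].filter (fun j => (2^A.length + i).testBit j) = [A.length] := by
    simp [hN]
  have hfst : (List.range A.length).filter (fun j => (2^A.length + i).testBit j)
      = (List.range A.length).filter (fun j => i.testBit j) := by
    apply List.filter_congr
    intro j hj
    exact Nat.testBit_two_pow_add_gt (List.mem_range.mp hj) i
  rw [hone, hfst, List.map_append, List.sum_append]
  have hmap : List.map (fun j => (A ++ [a]).getD j 0)
        ((List.range A.length).filter (fun j => i.testBit j))
      = List.map (fun j => A.getD j 0)
        ((List.range A.length).filter (fun j => i.testBit j)) := by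
    apply List.map_congr_left
    intro j hj
    have hj' : j < A.length := List.mem_range.mp (List.mem_of_mem_filter hj)
    exact List.getD_append A [a] 0 j hj'
  rw [hmap]
  have hlast : (A ++ [a]).getD A.length 0 = a := by simp [List.getD]
  simp

lemma grp_append_zero (A : List Int) (a : Int) : grp (A ++ [a]) 0 = grp A 0 := by
  unfold grp
  have hlen : (A ++ [a]).length = A.length + 1 := by simp
  rw [hlen]
  have h2 : 2^(A.length+1) = 2^A.length + 2^A.length := by ring
  rw [h2, List.range_add, List.filter_append, List.map_append]
  have hsnd : (List.map (fun x => 2^A.length + x) (List.range (2^A.length))).filter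
      (fun i => decide (pcN i = 0)) = [] := by
    rw [List.filter_map]
    apply List.map_eq_nil_iff.mpr
    apply List.filter_eq_nil_iff.mpr
    intro x hx
    simp only [Function.comp_apply, pcN_two_pow_add A.length x (List.mem_range.mp hx)]
    simp
  rw [hsnd, List.map_nil, List.append_nil]
  apply List.map_congr_left
  intro i hi
  exact msum_low A a i (List.mem_range.mp (List.mem_of_mem_filter hi))

lemma grp_append_succ (A : List Int) (a : Int) (k : Nat) :
    grp (A ++ [a]) (k+1) = grp A (k+1) ++ (grp A k).map (fun s => s + a) := by
  unfold grp
  have hlen : (A ++ [a]).length = A.length + 1 := by simp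
  rw [hlen]
  have h2 : 2^(A.length+1) = 2^A.length + 2^A.length := by ring
  rw [h2, List.range_add, List.filter_append, List.map_append]
  have hfst : ((List.range (2^A.length)).filter (fun i => decide (pcN i = k+1))).map
      (msum (A ++ [a]))
      = ((List.range (2^A.length)).filter (fun i => decide (pcN i = k+1))).map (msum A) := by
    apply List.map_congr_left
    intro i hi
    exact msum_low A a i (List.mem_range.mp (List.mem_of_mem_filter hi))
  rw [hfst]
  apply congrArg
  rw [List.filter_map, List.map_map]
  have hfilt : (List.range (2^A.length)).filter
      ((fun i => decide (pcN i = k+1)) ∘ (fun x => 2^A.length + x))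
      = (List.range (2^A.length)).filter (fun i => decide (pcN i = k)) := by
    apply List.filter_congr
    intro i hi
    simp only [Function.comp_apply, pcN_two_pow_add A.length i (List.mem_range.mp hi)]
    simp
  rw [hfilt, List.map_map]
  apply List.map_congr_left
  intro i hi
  simp only [Function.comp_apply]
  exact msum_high A a i (List.mem_range.mp (List.mem_of_mem_filter hi))

lemma ofList_map_inj {α β : Type} [BEq α] [LawfulBEq α] [BEq β] [LawfulBEq β]
    (f : α → β) (hf : Function.Injective f) (xs : List α) :
    PySem.Set.ofList (xs.map f) = (PySem.Set.ofList xs).map f := by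
  induction xs using List.reverseRecOn with
  | nil => simp [PySem.Set.ofList_nil]
  | append_singleton xs x ih =>
    rw [List.map_append, List.map_singleton, PySem.Set.ofList_append_singleton,
      PySem.Set.ofList_append_singleton, PySem.Set.add_eq_ite, PySem.Set.add_eq_ite, ih]
    by_cases hmem : x ∈ PySem.Set.ofList xs
    · rw [if_pos hmem, if_pos (List.mem_map_of_mem hmem)]
    · rw [if_neg hmem, if_neg (fun hc => hmem ((List.mem_map_of_injective hf).mp hc)),
        List.map_append, List.map_singleton]

lemma contains_range (n y : Nat) :
    PySem.Set.contains (List.range n) y = decide (y < n) := by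
  rw [PySem.Set.contains_eq_listContains]
  simp [List.mem_range]

-- the keys appended by A's grouping loop are exactly 0, 1, …, min N k' in this order
lemma ks (N : Nat) : ∀ k' : Nat,
    PySem.Set.ofList (((List.range (2^N)).filter (fun i => decide (pcN i ≤ k'))).map pcN)
      = List.range (min N k' + 1) := by
  induction N with
  | zero =>
    intro k'
    have h0 : (2:Nat)^0 = 1 := by norm_num
    rw [h0]
    have h1 : (List.range 1).filter (fun i => decide (pcN i ≤ k')) = [0] := by
      simp [List.range_succ, pcN_zero]
    rw [h1, show List.map pcN [0] = [0] by simp [pcN_zero], Nat.zero_min]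
    decide
  | succ N ih =>
    intro k'
    have h2 : 2^(N+1) = 2^N + 2^N := by ring
    rw [h2, List.range_add, List.filter_append, List.map_append, PySem.Set.ofList_append, ih k']
    have hsnd : ((List.map (fun x => 2^N + x) (List.range (2^N))).filter
        (fun i => decide (pcN i ≤ k'))).map pcN
        = (((List.range (2^N)).filter (fun i => decide (pcN i + 1 ≤ k'))).map pcN).map
            (fun x => x + 1) := by
      rw [List.filter_map]
      have hpred : (List.range (2^N)).filter
          ((fun i => decide (pcN i ≤ k')) ∘ (fun x => 2^N + x))
          = (List.range (2^N)).filter (fun i => decide (pcN i + 1 ≤ k')) := by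
        apply List.filter_congr
        intro i hi
        simp [Function.comp_apply, pcN_two_pow_add N i (List.mem_range.mp hi)]
      rw [hpred, List.map_map, List.map_map]
      apply List.map_congr_left
      intro i hi
      simp [Function.comp_apply,
        pcN_two_pow_add N i (List.mem_range.mp (List.mem_of_mem_filter hi))]
    rw [hsnd]
    cases k' with
    | zero =>
      have hnil : (List.range (2^N)).filter (fun i => decide (pcN i + 1 ≤ 0)) = [] := by
        apply List.filter_eq_nil_iff.mpr
        intro x _
        simp
      rw [hnil]
      simp [PySem.Set.update_nil]
    | succ k =>
      have hpred2 : (List.range (2^N)).filter (fun i => decide (pcN i + 1 ≤ k + 1))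
          = (List.range (2^N)).filter (fun i => decide (pcN i ≤ k)) := by
        apply List.filter_congr
        intro i _
        simp
      rw [hpred2, PySem.Set.update_eq_append_filter,
        ofList_map_inj (fun x => x + 1) (add_left_injective 1), ih k]
      by_cases hNk : N ≤ k
      · have e1 : min N k = N := by omega
        have e2 : min N (k+1) = N := by omega
        have e3 : min (N+1) (k+1) = N+1 := by omega
        rw [e1, e2, e3]
        have hfilt : (List.filter (fun y => !PySem.Set.contains (List.range (N+1)) y)
            (List.map (fun x => x + 1) (List.range (N+1)))) = [N+1] := by
          rw [List.filter_map]
          have hin : (List.range (N+1)).filter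
              ((fun y => !PySem.Set.contains (List.range (N+1)) y) ∘ (fun x => x + 1))
              = (List.range (N+1)).filter (fun j => decide (j = N)) := by
            apply List.filter_congr
            intro j hj
            have hj' : j < N + 1 := List.mem_range.mp hj
            by_cases h : j = N <;> simp [Function.comp_apply, contains_range, h] <;> omega
          rw [hin, List.range_succ, List.filter_append]
          have hz : (List.range N).filter (fun j => decide (j = N)) = [] := by
            apply List.filter_eq_nil_iff.mpr
            intro x hx
            have := List.mem_range.mp hx
            simp
            omega
          rw [hz]
          simp
        rw [hfilt, ← List.range_succ]
      · have e1 : min N k = k := by omega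
        have e2 : min N (k+1) = k + 1 := by omega
        have e3 : min (N+1) (k+1) = k + 1 := by omega
        rw [e1, e2, e3]
        have hfilt : (List.filter (fun y => !PySem.Set.contains (List.range (k+1+1)) y)
            (List.map (fun x => x + 1) (List.range (k+1)))) = [] := by
          apply List.filter_eq_nil_iff.mpr
          intro x hx
          rcases List.mem_map.mp hx with ⟨j, hj, rfl⟩
          have := List.mem_range.mp hj
          simp [contains_range]
          omega
        rw [hfilt, List.append_nil]

lemma value_eq (A : List Int) (i : Nat) :
    (((PySem.List.pyRange 0 (A.length : Int) 1).filter
        (fun j => PySem.Int.band ((i : Nat) : Int) ((1:Int) <<< (j.toNat : Int)) != 0)).map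
      (fun j => PySem.List.pyGetD A j 0)).sum = msum A i := by
  rw [PySem.List.pyRange_zero_natCast, List.filter_map, List.map_map]
  unfold msum
  have hfilt : (List.range A.length).filter
      ((fun j : Int => PySem.Int.band ((i : Nat) : Int) ((1:Int) <<< (j.toNat : Int)) != 0) ∘
        (fun k : Nat => (k : Int)))
      = (List.range A.length).filter (fun j => i.testBit j) := by
    apply List.filter_congr
    intro j _
    have h1 : (1:Int) <<< ((((j : Nat) : Int)).toNat : Int) = ((2^j : Nat) : Int) := by
      rw [Int.toNat_natCast]
      exact Int.one_shiftLeft j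
    simp only [Function.comp_apply, h1, PySem.Int.band_natCast]
    have h2 := Nat.and_two_pow i j
    have h3 : (2:Nat)^j ≠ 0 := (Nat.two_pow_pos j).ne'
    cases hb : i.testBit j <;> simp_all
  rw [hfilt]
  apply congrArg
  apply List.map_congr_left
  intro j _
  simp [PySem.List.pyGetD_natCast]

lemma getD_grp (A : List Int) (k' k : Nat) (hk : k ≤ k') :
    (((List.range (2^A.length)).filter (fun i => decide (pcN i ≤ k'))).foldl
      (fun d i => d.modify ((pcN i : Nat) : Int) [] (fun v => v ++ [msum A i]))
      PySem.Dict.empty).getD ((k : Nat) : Int) []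
      = grp A k := by
  rw [show (fun (d : PySem.Dict Int (List Int)) (i : Nat) =>
        d.modify ((pcN i : Nat) : Int) [] (fun v => v ++ [msum A i]))
      = (fun d i => (fun (d : PySem.Dict Int (List Int)) (p : Int × Int) =>
          d.modify p.1 [] (fun v => v ++ [p.2])) d
        ((fun i => ((((pcN i : Nat) : Int)), msum A i)) i)) from rfl,
    ← List.foldl_map (f := fun i : Nat => ((((pcN i : Nat) : Int)), msum A i))
      (g := fun (d : PySem.Dict Int (List Int)) (p : Int × Int) =>
        d.modify p.1 [] (fun v => v ++ [p.2]))]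
  rw [PySem.Dict.getD_foldl_modify_append, PySem.Dict.getD_empty, List.nil_append]
  rw [List.filter_map, List.map_map]
  have hpred : ((List.range (2^A.length)).filter (fun i => decide (pcN i ≤ k'))).filter
      ((fun p : Int × Int => p.1 == ((k : Nat) : Int)) ∘
        (fun i => ((((pcN i : Nat) : Int)), msum A i)))
      = (List.range (2^A.length)).filter (fun i => decide (pcN i = k)) := by
    rw [List.filter_filter]
    apply List.filter_congr
    intro i _
    by_cases h : pcN i = k <;> simp [h, hk, Nat.cast_inj]
  rw [hpred]
  rfl

lemma A_closed (A : List Int) (K : Int) : describe_all A K = closedForm A K := by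
  simp only [describe_all]
  have hpow : ((2:Int)^A.length) = ((2^A.length : Nat) : Int) := by push_cast; ring
  rw [hpow, PySem.List.pyRange_zero_natCast (2^A.length), List.foldl_map]
  by_cases hK : K < 0
  · have hbody : ∀ (d : PySem.Dict Int (List Int)) (j : Nat), j ∈ List.range (2^A.length) →
        (if ((PySem.Int.bitCount ((j : Nat) : Int) : Nat) : Int) > K then d
         else d.modify ((PySem.Int.bitCount ((j : Nat) : Int) : Nat) : Int) []
          (fun v => v ++ [(((PySem.List.pyRange 0 (A.length : Int) 1).filter
              (fun j' => PySem.Int.band ((j : Nat) : Int) ((1:Int) <<< (j'.toNat : Int)) != 0)).map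
            (fun j' => PySem.List.pyGetD A j' 0)).sum])) = d := by
      intro d j _
      rw [if_pos]
      have hnn : (0:Int) ≤ ((PySem.Int.bitCount ((j : Nat) : Int) : Nat) : Int) :=
        Int.natCast_nonneg _
      omega
    rw [PySem.List.foldl_congr_mem (h := hbody), PySem.List.foldl_ignore]
    rw [PySem.Dict.items_eq_map_keys PySem.Dict.empty PySem.Dict.nodup_keys_empty [],
      PySem.Dict.keys_empty]
    simp [closedForm, hK]
  · have hbody : ∀ (d : PySem.Dict Int (List Int)) (j : Nat), j ∈ List.range (2^A.length) →
        (if ((PySem.Int.bitCount ((j : Nat) : Int) : Nat) : Int) > K then d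
         else d.modify ((PySem.Int.bitCount ((j : Nat) : Int) : Nat) : Int) []
          (fun v => v ++ [(((PySem.List.pyRange 0 (A.length : Int) 1).filter
              (fun j' => PySem.Int.band ((j : Nat) : Int) ((1:Int) <<< (j'.toNat : Int)) != 0)).map
            (fun j' => PySem.List.pyGetD A j' 0)).sum]))
        = (if pcN j ≤ K.toNat then d.modify ((pcN j : Nat) : Int) [] (fun v => v ++ [msum A j])
           else d) := by
      intro d j _
      rw [value_eq A j]
      by_cases h : pcN j ≤ K.toNat
      · rw [if_neg (show ¬ ((PySem.Int.bitCount ((j : Nat) : Int) : Nat) : Int) > K by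
            unfold pcN at h; omega), if_pos h]
        rfl
      · rw [if_pos (show ((PySem.Int.bitCount ((j : Nat) : Int) : Nat) : Int) > K by
            unfold pcN at h; omega), if_neg h]
    rw [PySem.List.foldl_congr_mem (h := hbody),
      PySem.List.foldl_ite_eq_foldl_filter (p := fun i => pcN i ≤ K.toNat)]
    have hnd : (((List.range (2^A.length)).filter (fun i => decide (pcN i ≤ K.toNat))).foldl
        (fun (d : PySem.Dict Int (List Int)) i =>
          d.modify ((pcN i : Nat) : Int) [] (fun v => v ++ [msum A i]))
        PySem.Dict.empty).keys.Nodup :=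
      PySem.Dict.nodup_keys_foldl_modify_key _ _ _ _ _ PySem.Dict.nodup_keys_empty
    rw [PySem.Dict.items_eq_map_keys _ hnd []]
    have hkeys : (((List.range (2^A.length)).filter (fun i => decide (pcN i ≤ K.toNat))).foldl
        (fun (d : PySem.Dict Int (List Int)) i =>
          d.modify ((pcN i : Nat) : Int) [] (fun v => v ++ [msum A i]))
        PySem.Dict.empty).keys
        = (List.range (min A.length K.toNat + 1)).map (fun k : Nat => ((k : Nat) : Int)) := by
      rw [PySem.Dict.keys_foldl_modify_key, PySem.Dict.keys_empty,
        PySem.Set.update_nil_left]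
      have hmm : ((List.range (2^A.length)).filter (fun i => decide (pcN i ≤ K.toNat))).map
          (fun i => ((pcN i : Nat) : Int))
          = (((List.range (2^A.length)).filter (fun i => decide (pcN i ≤ K.toNat))).map pcN).map
              (fun k : Nat => ((k : Nat) : Int)) := by
        rw [List.map_map]; rfl
      rw [hmm, ofList_map_inj _ (fun a b h => by exact_mod_cast h), ks A.length K.toNat]
    rw [hkeys, List.map_map, List.map_map, closedForm, if_neg hK]
    apply List.map_congr_left
    intro k hk
    have hk' : k ≤ min A.length K.toNat := by
      have := List.mem_range.mp hk; omega
    simp only [Function.comp_apply]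
    rw [getD_grp A K.toNat k (by omega)]

lemma grp_nil_succ (k : Nat) : grp [] (k+1) = [] := by
  simp [grp, pcN_zero]

lemma dp_base (L : Nat) :
    ([[0]] ++ List.replicate L ([] : List Int)) = (List.range (L+1)).map (fun k => grp [] k) := by
  apply List.ext_getElem
  · simp
  · intro i h1 h2
    rw [List.getElem_map, List.getElem_range]
    cases i with
    | zero =>
      rw [List.getElem_append_left (by simp : 0 < ([[0]] : List (List Int)).length)]
      have hg : grp [] 0 = [0] := by decide
      simp [hg]
    | succ j =>
      rw [List.getElem_append_right (by simp : ([[0]] : List (List Int)).length ≤ j + 1)]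
      rw [List.getElem_replicate, grp_nil_succ]

lemma dp_step (A : List Int) (a : Int) (L : Nat) :
    (PySem.List.slice ((List.range (L+1)).map (fun k => grp A k)) none (some 1) ++
      ((PySem.List.slice ((List.range (L+1)).map (fun k => grp A k)) (some 1) none).zip
        ((List.range (L+1)).map (fun k => grp A k))).map
        (fun p => p.1 ++ p.2.map (fun s => s + a)))
      = (List.range (L+1)).map (fun k => grp (A ++ [a]) k) := by
  rw [PySem.List.slice_to _ (by norm_num : (0:Int) ≤ 1),
    PySem.List.slice_from _ (by norm_num : (0:Int) ≤ 1)]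
  have htn : ((1:Int)).toNat = 1 := rfl
  rw [htn]
  have htake : (List.take 1 ((List.range (L+1)).map (fun k => grp A k))).length = 1 := by
    simp
  apply List.ext_getElem
  · simp
    omega
  · intro i h1 h2
    cases i with
    | zero =>
      rw [List.getElem_append_left (by rw [htake]; omega)]
      rw [List.getElem_take, List.getElem_map, List.getElem_range,
        List.getElem_map, List.getElem_range, grp_append_zero]
    | succ j =>
      rw [List.getElem_append_right (by rw [htake]; omega)]
      simp only [htake, Nat.add_sub_cancel, List.getElem_map, List.getElem_zip,
        List.getElem_drop, List.getElem_range, Nat.add_comm 1 j]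
      exact (grp_append_succ A a j).symm

lemma dp_eq (A : List Int) (L : Nat) :
    A.foldl (fun layers a =>
      PySem.List.slice layers none (some 1) ++
        ((PySem.List.slice layers (some 1) none).zip layers).map
          (fun p => p.1 ++ p.2.map (fun s => s + a)))
      ([[0]] ++ List.replicate L ([] : List Int))
      = (List.range (L+1)).map (fun k => grp A k) := by
  induction A using List.reverseRecOn with
  | nil => simpa using dp_base L
  | append_singleton xs x ih =>
    rw [List.foldl_append, ih, List.foldl_cons, List.foldl_nil, dp_step]

lemma B_closed (A : List Int) (K : Int) : describe_all_alt A K = closedForm A K := by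
  simp only [describe_all_alt, closedForm]
  by_cases hK : K < 0
  · rw [if_pos (show min ((A.length : Nat) : Int) K < 0 by omega), if_pos hK]
  · rw [if_neg (show ¬ min ((A.length : Nat) : Int) K < 0 by omega), if_neg hK]
    have hL : (min ((A.length : Nat) : Int) K).toNat = min A.length K.toNat := by omega
    rw [hL, dp_eq]
    apply List.ext_getElem
    · simp [PySem.List.length_enumerate]
    · intro i h1 h2
      rw [List.getElem_map, PySem.List.getElem_enumerate, List.getElem_map, List.getElem_range,
        List.getElem_map, List.getElem_range]
      simp

-- ===== VERDICT (by name: the statement is the Claim_ definition above) =====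
theorem describe_all_spec : Claim_equal_describe_all := by
  intro A K _
  unfold Spec_describe_all
  rw [A_closed, B_closed]
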